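-- pv_equiv track=rewrite | github.com/andrzejdackiewicz/airbyte-fixing-amazon-seller-partner-schema | airbyte-integrations/connectors/source-linkedin-pages/source_linkedin_pages/utils.py | build_share_statistics_parameters
-- ===== SOURCE A (Python) =====
-- from typing import Any, Dict, Iterable, List, Mapping
--
-- def build_share_statistics_parameters(share_post_list: List) -> Mapping[str, Any]:
--
--     share_counter = 0
--     ugc_post_counter = 0
--     result = {}
--
--     for id in share_post_list:
--         if "share" in id:
--             key = f"shares[{share_counter}]"
--             result[key] = id
--             share_counter += 1
--         elif "ugcPost" in id:
--             key = f"ugcPosts[{ugc_post_counter}]"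
--             result[key] = id
--             ugc_post_counter += 1
--
--     return result
-- ===== SOURCE B (Python) =====
-- def build_share_statistics_parameters(share_post_list):
--     def share_rank(i):
--         return sum(1 for y in share_post_list[:i] if "share" in y)
--
--     def ugc_rank(i):
--         return sum(1 for y in share_post_list[:i] if "share" not in y and "ugcPost" in y)
--
--     return {
--         (f"shares[{share_rank(i)}]" if "share" in x else f"ugcPosts[{ugc_rank(i)}]"): x
--         for i, x in enumerate(share_post_list)
--         if "share" in x or "ugcPost" in x
--     }
-- ===== Notes on version B (the rewrite author's own statement) =====
-- stated objective: alternative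
-- what changed: Replaced the stateful loop with two running counters by a stateless dict comprehension that derives each key's index by counting matching ids in the prefix before the element.
import Mathlib
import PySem

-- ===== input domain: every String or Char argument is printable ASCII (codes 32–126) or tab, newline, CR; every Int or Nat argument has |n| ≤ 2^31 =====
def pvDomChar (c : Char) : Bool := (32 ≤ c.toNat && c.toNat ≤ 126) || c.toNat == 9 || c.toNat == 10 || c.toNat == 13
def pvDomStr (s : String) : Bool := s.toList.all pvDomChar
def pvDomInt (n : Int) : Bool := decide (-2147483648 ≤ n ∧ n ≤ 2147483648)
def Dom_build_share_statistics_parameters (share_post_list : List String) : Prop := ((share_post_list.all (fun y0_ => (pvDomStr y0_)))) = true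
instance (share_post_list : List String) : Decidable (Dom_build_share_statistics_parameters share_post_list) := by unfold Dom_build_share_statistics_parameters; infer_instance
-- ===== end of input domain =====

-- B replaces A's stateful two-counter loop by a stateless dict comprehension whose key index is a prefix count (alternative decomposition, not faster); return values agree on all inputs.


-- ===== PORT A =====
def build_share_statistics_parameters (share_post_list : List String) : List (String × String) :=
  ((share_post_list.foldl
      (fun (st : Int × Int × PySem.Dict String String) (id : String) =>
        if PySem.Str.isIn "share" id then
          (st.1 + 1, st.2.1, st.2.2.insert ("shares[" ++ PySem.Int.toStr st.1 ++ "]") id)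
        else if PySem.Str.isIn "ugcPost" id then
          (st.1, st.2.1 + 1, st.2.2.insert ("ugcPosts[" ++ PySem.Int.toStr st.2.1 ++ "]") id)
        else st)
      (0, 0, PySem.Dict.empty)).2.2).items

-- ===== PORT B =====
-- sum(1 for y in share_post_list[:i] if "share" in y)
def bsspShareRank (share_post_list : List String) (i : Int) : Int :=
  (PySem.List.slice share_post_list none (some i)).foldl
    (fun acc y => if PySem.Str.isIn "share" y then acc + 1 else acc) 0

-- sum(1 for y in share_post_list[:i] if "share" not in y and "ugcPost" in y)
def bsspUgcRank (share_post_list : List String) (i : Int) : Int :=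
  (PySem.List.slice share_post_list none (some i)).foldl
    (fun acc y => if !PySem.Str.isIn "share" y && PySem.Str.isIn "ugcPost" y then acc + 1 else acc) 0

def build_share_statistics_parameters_alt (share_post_list : List String) : List (String × String) :=
  ((PySem.List.enumerate share_post_list).foldl
      (fun (d : PySem.Dict String String) (p : Int × String) =>
        if PySem.Str.isIn "share" p.2 || PySem.Str.isIn "ugcPost" p.2 then
          d.insert
            (if PySem.Str.isIn "share" p.2 then
              "shares[" ++ PySem.Int.toStr (bsspShareRank share_post_list p.1) ++ "]"
             else
              "ugcPosts[" ++ PySem.Int.toStr (bsspUgcRank share_post_list p.1) ++ "]")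
            p.2
        else d)
      PySem.Dict.empty).items

-- ===== PRECONDITION & SPEC =====
def Spec_build_share_statistics_parameters (share_post_list : List String) (out : List (String × String)) : Prop := out = build_share_statistics_parameters_alt share_post_list
instance (share_post_list : List String) (out : List (String × String)) : Decidable (Spec_build_share_statistics_parameters share_post_list out) := by unfold Spec_build_share_statistics_parameters; infer_instance

-- ===== CLAIM (what is proved, stated in full; the proofs are below) =====
def Claim_equal_build_share_statistics_parameters : Prop := ∀ (share_post_list : List String), Dom_build_share_statistics_parameters share_post_list → Spec_build_share_statistics_parameters share_post_list (build_share_statistics_parameters share_post_list)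

-- ===== LEMMAS AND PROOFS =====
-- counters of A expressed as prefix counts
def bsspCntS (pre : List String) : Int :=
  pre.foldl (fun acc y => if PySem.Str.isIn "share" y then acc + 1 else acc) 0

def bsspCntU (pre : List String) : Int :=
  pre.foldl (fun acc y => if !PySem.Str.isIn "share" y && PySem.Str.isIn "ugcPost" y then acc + 1 else acc) 0

lemma bsspShareRank_take (l pre rest : List String) (h : l = pre ++ rest) :
    bsspShareRank l (pre.length : Int) = bsspCntS pre := by
  simp [bsspShareRank, bsspCntS, PySem.List.slice_to_natCast, h]

lemma bsspUgcRank_take (l pre rest : List String) (h : l = pre ++ rest) :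
    bsspUgcRank l (pre.length : Int) = bsspCntU pre := by
  simp [bsspUgcRank, bsspCntU, PySem.List.slice_to_natCast, h]

lemma bssp_main (l : List String) : ∀ (rest pre : List String) (d : PySem.Dict String String),
    l = pre ++ rest →
    (rest.foldl
      (fun (st : Int × Int × PySem.Dict String String) (id : String) =>
        if PySem.Str.isIn "share" id then
          (st.1 + 1, st.2.1, st.2.2.insert ("shares[" ++ PySem.Int.toStr st.1 ++ "]") id)
        else if PySem.Str.isIn "ugcPost" id then
          (st.1, st.2.1 + 1, st.2.2.insert ("ugcPosts[" ++ PySem.Int.toStr st.2.1 ++ "]") id)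
        else st)
      (bsspCntS pre, bsspCntU pre, d)).2.2 =
    (PySem.List.enumerate rest (pre.length : Int)).foldl
      (fun (d : PySem.Dict String String) (p : Int × String) =>
        if PySem.Str.isIn "share" p.2 || PySem.Str.isIn "ugcPost" p.2 then
          d.insert
            (if PySem.Str.isIn "share" p.2 then
              "shares[" ++ PySem.Int.toStr (bsspShareRank l p.1) ++ "]"
             else
              "ugcPosts[" ++ PySem.Int.toStr (bsspUgcRank l p.1) ++ "]")
            p.2
        else d) d := by
  intro rest
  induction rest with
  | nil => intro pre d h; simp [PySem.List.enumerate]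
  | cons x xs ih =>
    intro pre d h
    have hS : bsspCntS (pre ++ [x]) =
        if PySem.Str.isIn "share" x then bsspCntS pre + 1 else bsspCntS pre := by
      simp [bsspCntS, List.foldl_append]
    have hU : bsspCntU (pre ++ [x]) =
        if !PySem.Str.isIn "share" x && PySem.Str.isIn "ugcPost" x
        then bsspCntU pre + 1 else bsspCntU pre := by
      simp [bsspCntU, List.foldl_append]
    have h' : l = (pre ++ [x]) ++ xs := by simp [h]
    have hlen : ((pre ++ [x]).length : Int) = (pre.length : Int) + 1 := by
      simp
    rw [PySem.List.enumerate_cons]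
    simp only [List.foldl_cons]
    rw [bsspShareRank_take l pre (x :: xs) h, bsspUgcRank_take l pre (x :: xs) h]
    by_cases hsx : PySem.Str.isIn "share" x = true
    · have key := ih (pre ++ [x]) (d.insert ("shares[" ++ PySem.Int.toStr (bsspCntS pre) ++ "]") x) h'
      rw [hlen, hS, hU] at key
      simp only [hsx, Bool.not_true, Bool.false_and, Bool.true_or, if_true] at key ⊢
      exact key
    · rw [Bool.not_eq_true] at hsx
      by_cases hux : PySem.Str.isIn "ugcPost" x = true
      · have key := ih (pre ++ [x]) (d.insert ("ugcPosts[" ++ PySem.Int.toStr (bsspCntU pre) ++ "]") x) h'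
        rw [hlen, hS, hU] at key
        simp only [hsx, hux, Bool.not_false, Bool.true_and, Bool.false_or, if_true] at key ⊢
        exact key
      · rw [Bool.not_eq_true] at hux
        have key := ih (pre ++ [x]) d h'
        rw [hlen, hS, hU] at key
        simp only [hsx, hux, Bool.not_false, Bool.true_and, Bool.or_self] at key ⊢
        exact key

-- ===== VERDICT (by name: the statement is the Claim_ definition above) =====
theorem build_share_statistics_parameters_spec : Claim_equal_build_share_statistics_parameters := by
  intro l _
  unfold Spec_build_share_statistics_parameters build_share_statistics_parameters
    build_share_statistics_parameters_alt
  have := bssp_main l l [] PySem.Dict.empty (by simp)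
  simp only [bsspCntS, bsspCntU, List.foldl_nil, List.length_nil, Int.natCast_zero] at this
  rw [this]
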